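-- pv_equiv track=rewrite | github.com/miethe/skillmeat | skillmeat/core/scoring/match_analyzer.py | _contains_phrase
-- ===== SOURCE A (Python) =====
-- from typing import List, Optional, Tuple
--
-- def _contains_phrase(
--     field_tokens: List[str], query_tokens: List[str]
-- ) -> bool:
--     """Check if field contains all query tokens in order (allowing gaps).
--
--     Args:
--         field_tokens: Tokenized field text
--         query_tokens: Tokenized query
--
--     Returns:
--         True if all query tokens appear in field_tokens in order
--
--     Example:
--         >>> analyzer = MatchAnalyzer()
--         >>> field = ["pdf", "converter", "tool"]
--         >>> query = ["pdf", "tool"]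
--         >>> analyzer._contains_phrase(field, query)
--         True
--         >>> query2 = ["tool", "pdf"]
--         >>> analyzer._contains_phrase(field, query2)
--         False
--     """
--     if not query_tokens or not field_tokens:
--         return False
--
--     # Find positions of query tokens in field
--     positions = []
--     for q_token in query_tokens:
--         try:
--             # Find first occurrence after last found position
--             start_idx = positions[-1] + 1 if positions else 0
--             idx = field_tokens.index(q_token, start_idx)
--             positions.append(idx)
--         except (ValueError, IndexError):
--             # Token not found in order
--             return False
--
--     return True
-- ===== SOURCE B (Python) =====
-- from typing import List
--
--
-- def _bisect_left(a, x):
--     lo, hi = 0, len(a)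
--     while lo < hi:
--         mid = (lo + hi) // 2
--         if a[mid] < x:
--             lo = mid + 1
--         else:
--             hi = mid
--     return lo
--
--
-- def _contains_phrase(
--     field_tokens: List[str], query_tokens: List[str]
-- ) -> bool:
--     if not query_tokens or not field_tokens:
--         return False
--     # Inverted index: token -> ascending list of its positions in the field
--     pos = {}
--     for i, tok in enumerate(field_tokens):
--         pos.setdefault(tok, []).append(i)
--     cur = 0
--     for q in query_tokens:
--         lst = pos.get(q, [])
--         j = _bisect_left(lst, cur)
--         if j == len(lst):
--             return False
--         cur = lst[j] + 1
--     return True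
-- ===== Notes on version B (the rewrite author's own statement) =====
-- stated objective: alternative
-- what changed: Replaces A's scan of the field via list.index with a moving start by a two-stage algorithm: first build an inverted index mapping each token to its ascending position list, then answer each query token by binary search (hand-written bisect_left) for the first indexed position at or after the cursor.
import Mathlib
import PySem

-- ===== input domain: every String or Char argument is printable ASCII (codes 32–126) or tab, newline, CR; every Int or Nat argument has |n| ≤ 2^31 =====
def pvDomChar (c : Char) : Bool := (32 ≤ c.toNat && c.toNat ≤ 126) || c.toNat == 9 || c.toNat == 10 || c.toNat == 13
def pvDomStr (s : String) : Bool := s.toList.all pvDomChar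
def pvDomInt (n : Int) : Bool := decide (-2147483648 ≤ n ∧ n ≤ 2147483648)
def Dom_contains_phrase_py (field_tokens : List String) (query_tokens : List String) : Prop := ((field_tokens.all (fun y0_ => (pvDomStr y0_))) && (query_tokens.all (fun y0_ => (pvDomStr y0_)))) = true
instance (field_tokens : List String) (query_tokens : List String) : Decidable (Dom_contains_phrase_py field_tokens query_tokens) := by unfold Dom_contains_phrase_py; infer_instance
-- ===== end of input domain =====

-- B replaces A's moving-start list.index scan by an inverted index (token -> ascending
-- position list) built once, queried by binary search; alternative algorithm, same results.

-- ===== PORT A =====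
-- field_tokens.index(q, start): first index ≥ start holding q (none = ValueError)
def pvIndexFrom (field : List String) (q : String) (start : Nat) : Option Nat :=
  (PySem.List.index? (field.drop start) q).map (· + start)

-- the 'for q_token in query_tokens' loop carrying the positions list
def pvLoopA (field : List String) : List String → List Nat → Bool
  | [], _ => true
  | q :: qs, positions =>
    let start := match positions.getLast? with
      | some p => p + 1
      | none => 0
    match pvIndexFrom field q start with
    | some idx => pvLoopA field qs (positions ++ [idx])
    | none => false

def contains_phrase_py (field_tokens : List String) (query_tokens : List String) : Bool :=
  if query_tokens.isEmpty || field_tokens.isEmpty then false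
  else pvLoopA field_tokens query_tokens []

-- ===== PORT B =====
-- hand-written bisect_left of Source B; lo/hi are nonnegative Python ints, so Nat division
-- (lo+hi)//2 is exact; a[mid] read with getD (mid is always in range when it is read)
def pvBisectLeft (a : List Int) (x : Int) (lo hi : Nat) : Nat :=
  if h : lo < hi then
    let mid := (lo + hi) / 2
    if a.getD mid 0 < x then pvBisectLeft a x (mid + 1) hi
    else pvBisectLeft a x lo mid
  else lo
termination_by hi - lo
decreasing_by all_goals omega

-- 'pos.setdefault(tok, []).append(i)' over enumerate(field_tokens)
def pvBuildPos (field : List String) : PySem.Dict String (List Int) :=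
  (PySem.List.enumerate field 0).foldl (fun d p => d.modify p.2 [] (· ++ [p.1])) PySem.Dict.empty

-- the 'for q in query_tokens' loop carrying the cursor
def pvLoopB (pos : PySem.Dict String (List Int)) : List String → Int → Bool
  | [], _ => true
  | q :: qs, cur =>
    let lst := pos.getD q []
    let j := pvBisectLeft lst cur 0 lst.length
    if j == lst.length then false
    else pvLoopB pos qs (lst.getD j 0 + 1)

def contains_phrase_py_alt (field_tokens : List String) (query_tokens : List String) : Bool :=
  if query_tokens.isEmpty || field_tokens.isEmpty then false
  else pvLoopB (pvBuildPos field_tokens) query_tokens 0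

-- ===== PRECONDITION & SPEC =====
def Spec_contains_phrase_py (field_tokens : List String) (query_tokens : List String) (out : Bool) : Prop := out = contains_phrase_py_alt field_tokens query_tokens
instance (field_tokens : List String) (query_tokens : List String) (out : Bool) : Decidable (Spec_contains_phrase_py field_tokens query_tokens out) := by unfold Spec_contains_phrase_py; infer_instance

-- ===== CLAIM (what is proved, stated in full; the proofs are below) =====
def Claim_equal_contains_phrase_py : Prop := ∀ (field_tokens : List String) (query_tokens : List String), Dom_contains_phrase_py field_tokens query_tokens → Spec_contains_phrase_py field_tokens query_tokens (contains_phrase_py field_tokens query_tokens)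

-- ===== LEMMAS AND PROOFS =====

-- proof-side bridge: the plain greedy subsequence scan
def pvScan : List String → List String → Bool
  | [], _ => true
  | _ :: _, [] => false
  | q :: qs, f :: fs => if f == q then pvScan qs fs else pvScan (q :: qs) fs

-- occurrence positions of q in l, offset by s
def pvOcc : List String → Nat → String → List Nat
  | [], _, _ => []
  | f :: fs, s, q => if f = q then s :: pvOcc fs (s + 1) q else pvOcc fs (s + 1) q

theorem pvOcc_shift (l : List String) (q : String) :
    ∀ s, pvOcc l s q = (pvOcc l 0 q).map (· + s) := by
  induction l with
  | nil => intro s; simp [pvOcc]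
  | cons f fs ih =>
    intro s
    by_cases h : f = q <;>
      simp [pvOcc, h, ih (s + 1), ih 1, List.map_map] <;>
      exact fun a _ => by omega

theorem pvOcc_append (a b : List String) (q : String) :
    ∀ s, pvOcc (a ++ b) s q = pvOcc a s q ++ pvOcc b (s + a.length) q := by
  induction a with
  | nil => intro s; simp [pvOcc]
  | cons f fs ih =>
    intro s
    by_cases h : f = q <;> simp [pvOcc, h, ih (s + 1)] <;> ring_nf

theorem pvOcc_mem_bounds (l : List String) (q : String) :
    ∀ s x, x ∈ pvOcc l s q → s ≤ x ∧ x < s + l.length := by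
  induction l with
  | nil => intro s x hx; simp [pvOcc] at hx
  | cons f fs ih =>
    intro s x hx
    simp only [List.length_cons]
    by_cases h : f = q <;> simp [pvOcc, h] at hx
    · rcases hx with rfl | hx
      · omega
      · have := ih (s + 1) x hx; omega
    · have := ih (s + 1) x hx; omega

theorem index?_eq_occ_head (l : List String) (q : String) :
    PySem.List.index? l q = (pvOcc l 0 q).head? := by
  induction l with
  | nil => simp [PySem.List.index?, pvOcc]
  | cons f fs ih =>
    by_cases h : f = q
    · subst h; rw [PySem.List.index?_cons_self]; simp [pvOcc]
    · rw [PySem.List.index?_cons_of_ne _ h, ih]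
      simp only [pvOcc, if_neg h, pvOcc_shift fs q 1]
      cases pvOcc fs 0 q <;> simp

-- the inverted index holds exactly the occurrence positions, cast to Int
theorem foldl_modify_getD (q : String) (l : List (Int × String)) :
    ∀ (d : PySem.Dict String (List Int)),
      (l.foldl (fun d p => d.modify p.2 [] (· ++ [p.1])) d).getD q [] =
        d.getD q [] ++ (l.filter (fun p => p.2 == q)).map (·.1) := by
  induction l with
  | nil => intro d; simp
  | cons p ps ih =>
    intro d
    by_cases h : p.2 = q
    · simp [List.foldl_cons, ih, h]
    · simp [List.foldl_cons, ih, h, PySem.Dict.getD_modify,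
        show ¬ q = p.2 from fun hq => h hq.symm]

theorem enumerate_filter_occ (field : List String) (q : String) :
    ∀ s : Nat,
      ((PySem.List.enumerate field (s : Int)).filter (fun p => p.2 == q)).map (·.1) =
        (pvOcc field s q).map (fun n : Nat => (n : Int)) := by
  induction field with
  | nil => intro s; simp [PySem.List.enumerate_nil, pvOcc]
  | cons f fs ih =>
    intro s
    rw [PySem.List.enumerate_cons,
      show ((s : Int) + 1) = ((s + 1 : Nat) : Int) by push_cast; ring, List.filter_cons]
    by_cases h : f = q
    · rw [if_pos (show ((f == q) = true) by simp [h]), List.map_cons,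
        show pvOcc (f :: fs) s q = s :: pvOcc fs (s + 1) q from by simp [pvOcc, h],
        List.map_cons, ih (s + 1)]
    · rw [if_neg (show ¬ ((f == q) = true) by simp [h]),
        show pvOcc (f :: fs) s q = pvOcc fs (s + 1) q from by simp [pvOcc, h]]
      exact ih (s + 1)

theorem buildPos_getD (field : List String) (q : String) :
    (pvBuildPos field).getD q [] = (pvOcc field 0 q).map (fun n : Nat => (n : Int)) := by
  unfold pvBuildPos
  rw [foldl_modify_getD]
  simp [PySem.Dict.getD_empty]
  have := enumerate_filter_occ field q 0
  norm_num at this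
  exact this

-- binary-search correctness
theorem pvBisect_eq (a : List Int) (x : Int) (t : Nat)
    (hlow : ∀ i, i < t → a.getD i 0 < x)
    (hhigh : ∀ i, t ≤ i → i < a.length → x ≤ a.getD i 0) :
    ∀ n lo hi, hi - lo ≤ n → lo ≤ t → t ≤ hi → hi ≤ a.length → pvBisectLeft a x lo hi = t := by
  intro n
  induction n with
  | zero =>
    intro lo hi h1 h2 h3 h4
    rw [pvBisectLeft, dif_neg (by omega)]
    omega
  | succ n ih =>
    intro lo hi h1 h2 h3 h4
    rw [pvBisectLeft]
    by_cases hlt : lo < hi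
    · simp only [dif_pos hlt]
      have hm1 : lo ≤ (lo + hi) / 2 := by omega
      have hm2 : (lo + hi) / 2 < hi := by omega
      by_cases hcmp : a.getD ((lo + hi) / 2) 0 < x
      · rw [if_pos hcmp]
        have hmt : (lo + hi) / 2 < t := by
          by_contra hc
          have := hhigh ((lo + hi) / 2) (by omega) (by omega)
          omega
        exact ih ((lo + hi) / 2 + 1) hi (by omega) (by omega) h3 h4
      · rw [if_neg hcmp]
        have hmt : t ≤ (lo + hi) / 2 := by
          by_contra hc
          have := hlow ((lo + hi) / 2) (by omega)
          omega
        exact ih lo ((lo + hi) / 2) (by omega) h2 hmt (by omega)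
    · rw [dif_neg hlt]
      omega

theorem pvBisect_split (u v : List Int) (x : Int)
    (hu : ∀ y ∈ u, y < x) (hv : ∀ y ∈ v, x ≤ y) :
    pvBisectLeft (u ++ v) x 0 (u ++ v).length = u.length := by
  apply pvBisect_eq (t := u.length)
  · intro i hi
    rw [List.getD_eq_getElem?_getD, List.getElem?_append_left hi]
    have hi' : i < u.length := hi
    rw [List.getElem?_eq_getElem hi']
    exact hu _ (List.getElem_mem hi')
  · intro i h1 h2
    rw [List.getD_eq_getElem?_getD, List.getElem?_append_right h1]
    simp at h2
    have hi' : i - u.length < v.length := by omega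
    rw [List.getElem?_eq_getElem hi']
    exact hv _ (List.getElem_mem hi')
  · exact Nat.le_refl _
  · exact Nat.zero_le _
  · simp
  · exact Nat.le_refl _

-- A's scan of a tail, phrased through the index of the first occurrence
theorem pvScan_eq_index (q : String) (qs rest : List String) :
    pvScan (q :: qs) rest =
      match PySem.List.index? rest q with
      | some j => pvScan qs (rest.drop (j + 1))
      | none => false := by
  induction rest with
  | nil => simp [pvScan, PySem.List.index?]
  | cons f fs ih =>
    by_cases h : f = q
    · subst h
      rw [PySem.List.index?_cons_self]
      simp [pvScan]
    · rw [PySem.List.index?_cons_of_ne fs h]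
      simp only [pvScan, beq_iff_eq]
      rw [if_neg h, ih]
      cases PySem.List.index? fs q with
      | none => rfl
      | some j => simp [List.drop]

-- invariant: A's loop from a positions list equals the plain scan of the field tail
theorem pvLoopA_eq_scan (field : List String) (query : List String) (positions : List Nat) :
    pvLoopA field query positions =
      pvScan query (field.drop (match positions.getLast? with
        | some p => p + 1
        | none => 0)) := by
  induction query generalizing positions with
  | nil => simp [pvLoopA, pvScan]
  | cons q qs ih =>
    simp only [pvLoopA]
    rw [pvScan_eq_index q qs]
    unfold pvIndexFrom
    cases hidx : PySem.List.index? (field.drop (match positions.getLast? with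
        | some p => p + 1 | none => 0)) q with
    | none => simp
    | some j =>
      simp only [Option.map_some]
      rw [ih]
      rw [List.getLast?_append]
      simp only [List.getLast?_singleton, Option.some_or]
      rw [List.drop_drop]
      congr 2
      omega

-- invariant: B's loop from cursor c equals the plain scan of the field tail
theorem pvLoopB_eq_scan (field : List String) (query : List String) :
    ∀ c : Nat, pvLoopB (pvBuildPos field) query (c : Int) = pvScan query (field.drop c) := by
  induction query with
  | nil => intro c; simp [pvLoopB, pvScan]
  | cons q qs ih =>
    intro c
    simp only [pvLoopB]
    rw [buildPos_getD]
    have hsplit : pvOcc field 0 q =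
        pvOcc (field.take c) 0 q ++
          (pvOcc (field.drop c) 0 q).map (· + (field.take c).length) := by
      conv_lhs => rw [← List.take_append_drop c field]
      rw [pvOcc_append]
      simp only [Nat.zero_add]
      rw [pvOcc_shift (field.drop c) q (field.take c).length]
    have hu : ∀ y ∈ (pvOcc (field.take c) 0 q).map (fun n : Nat => (n : Int)), y < (c : Int) := by
      intro y hy
      simp at hy
      obtain ⟨n, hn, rfl⟩ := hy
      have := pvOcc_mem_bounds (field.take c) q 0 n hn
      have hlen : (field.take c).length ≤ c := by simp
      exact_mod_cast by omega
    by_cases hc : c < field.length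
    · have htc : (field.take c).length = c := by simp; omega
      set v := pvOcc (field.drop c) 0 q with hv
      have hlst : (pvOcc field 0 q).map (fun n : Nat => (n : Int)) =
          (pvOcc (field.take c) 0 q).map (fun n : Nat => (n : Int)) ++
            v.map (fun n : Nat => ((n + c : Nat) : Int)) := by
        rw [hsplit]
        simp [htc]
      rw [hlst]
      have hvge : ∀ y ∈ v.map (fun n : Nat => ((n + c : Nat) : Int)), (c : Int) ≤ y := by
        intro y hy; simp at hy; obtain ⟨n, _, rfl⟩ := hy; omega
      rw [pvBisect_split _ _ _ hu hvge]
      rw [pvScan_eq_index, index?_eq_occ_head, ← hv]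
      cases hvv : v with
      | nil => simp
      | cons h0 t =>
        have hne : ((pvOcc (field.take c) 0 q).map (fun n : Nat => (n : Int))).length ≠
            (((pvOcc (field.take c) 0 q).map (fun n : Nat => (n : Int))) ++
              (h0 :: t).map (fun n : Nat => ((n + c : Nat) : Int))).length := by
          simp
        simp only [beq_iff_eq]
        rw [if_neg hne]
        have hget : (((pvOcc (field.take c) 0 q).map (fun n : Nat => (n : Int))) ++
              (h0 :: t).map (fun n : Nat => ((n + c : Nat) : Int))).getD
            ((pvOcc (field.take c) 0 q).map (fun n : Nat => (n : Int))).length 0 =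
            ((h0 + c : Nat) : Int) := by
          rw [List.getD_eq_getElem?_getD, List.getElem?_append_right (Nat.le_refl _)]
          simp
        rw [hget]
        have : ((h0 + c : Nat) : Int) + 1 = ((h0 + c + 1 : Nat) : Int) := by push_cast; ring
        rw [this, ih (h0 + c + 1)]
        simp only [List.head?_cons]
        rw [List.drop_drop]
        congr 2
        omega
    · -- cursor past the field: the tail is empty and every indexed position is < c
      have hdrop : field.drop c = [] := by
        rw [List.drop_eq_nil_iff]; omega
      have hall : ∀ y ∈ (pvOcc field 0 q).map (fun n : Nat => (n : Int)), y < (c : Int) := by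
        intro y hy
        simp at hy
        obtain ⟨n, hn, rfl⟩ := hy
        have := pvOcc_mem_bounds field q 0 n hn
        exact_mod_cast by omega
      have hb := pvBisect_split ((pvOcc field 0 q).map (fun n : Nat => (n : Int))) [] (c : Int)
        hall (by simp)
      simp only [List.append_nil] at hb
      rw [hb]
      simp [hdrop, pvScan]

theorem contains_phrase_py_eq (field_tokens query_tokens : List String) :
    contains_phrase_py field_tokens query_tokens = contains_phrase_py_alt field_tokens query_tokens := by
  unfold contains_phrase_py contains_phrase_py_alt
  split
  · rfl
  · rw [pvLoopA_eq_scan]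
    have h0 := pvLoopB_eq_scan field_tokens query_tokens 0
    simp only [Nat.cast_zero, List.drop_zero] at h0
    simp only [List.getLast?_nil, List.drop_zero]
    exact h0.symm

-- ===== VERDICT (by name: the statement is the Claim_ definition above) =====
theorem contains_phrase_py_spec : Claim_equal_contains_phrase_py := by
  intro f q _
  exact contains_phrase_py_eq f q
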